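-- pv_equiv track=rewrite | github.com/Jane-0221/6yao | divination_methods/utils.py | gua_to_yao_list
-- ===== SOURCE A (Python) =====
-- GUA_BINARIES = {
--     1: "111",  # 乾 ☰
--     2: "110",  # 兑 ☱
--     3: "101",  # 离 ☲
--     4: "100",  # 震 ☳
--     5: "011",  # 巽 ☴
--     6: "010",  # 坎 ☵
--     7: "001",  # 艮 ☶
--     8: "000",  # 坤 ☷
-- }
--
-- def gua_to_yao_list(upper_gua: int, lower_gua: int):
--     """
--     将上下卦转换为六爻列表
--
--     六爻排盘规则：
--     - 从下往上数：初爻（1爻）为最下方，上爻（6爻）为最上方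
--     - 下卦（内卦）是初、二、三爻
--     - 上卦（外卦）是四、五、上爻
--
--     Args:
--         upper_gua: 上卦(1-8)，对应外卦（四、五、上爻）
--         lower_gua: 下卦(1-8)，对应内卦（初、二、三爻）
--
--     Returns:
--         list: 六爻列表 [初爻, 二爻, 三爻, 四爻, 五爻, 上爻]
--               1=少阳（阳爻）, 2=少阴（阴爻）
--     """
--     # 获取上下卦的二进制表示（从下到上）
--     # 例如：乾=111（三阳爻），坤=000（三阴爻）
--     upper_bin = GUA_BINARIES.get(upper_gua, "000")
--     lower_bin = GUA_BINARIES.get(lower_gua, "000")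
--
--     # 组合成六爻（从下到上：下卦三位 + 上卦三位）
--     yao_list = []
--
--     # 下卦三位（初爻、二爻、三爻）
--     # 二进制中：1=阳爻->少阳(1), 0=阴爻->少阴(2)
--     for bit in lower_bin:
--         if bit == '1':
--             yao_list.append(1)  # 阳爻 -> 少阳
--         else:
--             yao_list.append(2)  # 阴爻 -> 少阴
--
--     # 上卦三位（四爻、五爻、上爻）
--     for bit in upper_bin:
--         if bit == '1':
--             yao_list.append(1)  # 阳爻 -> 少阳
--         else:
--             yao_list.append(2)  # 阴爻 -> 少阴
--
--     return yao_list
-- ===== SOURCE B (Python) =====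
-- def _tri(g):
--     # binary of the trigram without the table: GUA_BINARIES[g] is the 3-bit binary of 8-g;
--     # out-of-range g gets 0 ("000"), reproducing the .get default
--     v = 8 - g if 1 <= g <= 8 else 0
--     return [2 - (v // 4) % 2, 2 - (v // 2) % 2, 2 - v % 2]
--
-- def gua_to_yao_list(upper_gua, lower_gua):
--     return _tri(lower_gua) + _tri(upper_gua)
-- ===== Notes on version B (the rewrite author's own statement) =====
-- stated objective: simpler
-- what changed: Drops the GUA_BINARIES table and the per-character loops: each trigram's three yao are computed arithmetically from the bits of 8-g (0 for out-of-range g, matching the .get default), and the result is the lower triple concatenated with the upper triple.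
import Mathlib
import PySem

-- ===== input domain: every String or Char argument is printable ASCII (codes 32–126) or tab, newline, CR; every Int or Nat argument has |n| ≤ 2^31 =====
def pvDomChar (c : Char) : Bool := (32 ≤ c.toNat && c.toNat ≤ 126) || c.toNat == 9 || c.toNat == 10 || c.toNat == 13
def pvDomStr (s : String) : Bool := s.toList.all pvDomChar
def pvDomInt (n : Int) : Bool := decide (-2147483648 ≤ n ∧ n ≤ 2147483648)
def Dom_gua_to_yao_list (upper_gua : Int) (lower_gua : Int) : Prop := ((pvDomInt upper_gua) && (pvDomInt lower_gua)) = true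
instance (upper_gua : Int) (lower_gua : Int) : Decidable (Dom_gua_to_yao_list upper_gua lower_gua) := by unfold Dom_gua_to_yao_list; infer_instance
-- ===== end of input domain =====

-- B drops the GUA_BINARIES table and the character loops: each trigram is computed
-- arithmetically from the bits of 8-g (0 for out-of-range g, matching .get's default).


-- ===== PORT A =====
def guaBinaries : PySem.Dict Int String :=
  PySem.Dict.ofList [(1, "111"), (2, "110"), (3, "101"), (4, "100"),
                     (5, "011"), (6, "010"), (7, "001"), (8, "000")]

def gua_to_yao_list (upper_gua : Int) (lower_gua : Int) : List Int :=
  let upper_bin := guaBinaries.getD upper_gua "000"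
  let lower_bin := guaBinaries.getD lower_gua "000"
  let yao_list : List Int := []
  let yao_list := lower_bin.toList.foldl
    (fun acc bit => if bit = '1' then acc ++ [1] else acc ++ [2]) yao_list
  let yao_list := upper_bin.toList.foldl
    (fun acc bit => if bit = '1' then acc ++ [1] else acc ++ [2]) yao_list
  yao_list

-- ===== PORT B =====
def pvTri (g : Int) : List Int :=
  let v : Int := if 1 ≤ g ∧ g ≤ 8 then 8 - g else 0
  [2 - PySem.Int.mod (PySem.Int.floordiv v 4) 2,
   2 - PySem.Int.mod (PySem.Int.floordiv v 2) 2,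
   2 - PySem.Int.mod v 2]

def gua_to_yao_list_alt (upper_gua : Int) (lower_gua : Int) : List Int :=
  pvTri lower_gua ++ pvTri upper_gua

-- ===== PRECONDITION & SPEC =====
def Spec_gua_to_yao_list (upper_gua : Int) (lower_gua : Int) (out : List Int) : Prop := out = gua_to_yao_list_alt upper_gua lower_gua
instance (upper_gua : Int) (lower_gua : Int) (out : List Int) : Decidable (Spec_gua_to_yao_list upper_gua lower_gua out) := by unfold Spec_gua_to_yao_list; infer_instance

-- ===== CLAIM (what is proved, stated in full; the proofs are below) =====
def Claim_equal_gua_to_yao_list : Prop := ∀ (upper_gua : Int) (lower_gua : Int), Dom_gua_to_yao_list upper_gua lower_gua → Spec_gua_to_yao_list upper_gua lower_gua (gua_to_yao_list upper_gua lower_gua)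

-- ===== LEMMAS AND PROOFS =====

-- A's bit loop, started from acc, appends the mapped bits.
theorem foldl_bits (xs : List Char) (acc : List Int) :
    xs.foldl (fun acc bit => if bit = '1' then acc ++ [1] else acc ++ [2]) acc
      = acc ++ xs.map (fun bit => if bit = '1' then (1 : Int) else 2) := by
  induction xs generalizing acc with
  | nil => simp
  | cons x xs ih => simp only [List.foldl, List.map, ih]; split <;> simp

-- A's per-trigram fold, started from acc, appends exactly B's triple for g.
theorem triA_eq_append (g : Int) (acc : List Int) :
    (guaBinaries.getD g "000").toList.foldl
      (fun acc bit => if bit = '1' then acc ++ [1] else acc ++ [2]) acc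
      = acc ++ pvTri g := by
  rw [foldl_bits]
  congr 1
  by_cases h : 1 ≤ g ∧ g ≤ 8
  · have hg : g = 1 ∨ g = 2 ∨ g = 3 ∨ g = 4 ∨ g = 5 ∨ g = 6 ∨ g = 7 ∨ g = 8 := by omega
    rcases hg with rfl | rfl | rfl | rfl | rfl | rfl | rfl | rfl <;> decide
  · have hd : guaBinaries.getD g "000" = "000" := by
      have e1 : ((1 : Int) == g) = false := by simp; omega
      have e2 : ((2 : Int) == g) = false := by simp; omega
      have e3 : ((3 : Int) == g) = false := by simp; omega
      have e4 : ((4 : Int) == g) = false := by simp; omega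
      have e5 : ((5 : Int) == g) = false := by simp; omega
      have e6 : ((6 : Int) == g) = false := by simp; omega
      have e7 : ((7 : Int) == g) = false := by simp; omega
      have e8 : ((8 : Int) == g) = false := by simp; omega
      have hmk : guaBinaries = PySem.Dict.mk [(1, "111"), (2, "110"), (3, "101"), (4, "100"),
          (5, "011"), (6, "010"), (7, "001"), (8, "000")] := by rfl
      rw [hmk, PySem.Dict.getD_eq_get?_getD]
      simp [e1, e2, e3, e4, e5, e6, e7, e8, PySem.Dict.get?]
    rw [hd]
    simp [pvTri, h]

-- ===== VERDICT (by name: the statement is the Claim_ definition above) =====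
theorem gua_to_yao_list_spec : Claim_equal_gua_to_yao_list := by
  intro u l _
  show gua_to_yao_list u l = gua_to_yao_list_alt u l
  show (guaBinaries.getD u "000").toList.foldl
      (fun acc bit => if bit = '1' then acc ++ [1] else acc ++ [2])
      ((guaBinaries.getD l "000").toList.foldl
        (fun acc bit => if bit = '1' then acc ++ [1] else acc ++ [2]) [])
      = pvTri l ++ pvTri u
  rw [triA_eq_append, triA_eq_append]
  simp
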